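-- pv_equiv track=rewrite | github.com/owenburton/scholar-stats | scraper/utils.py | get_counts_dicts
-- ===== SOURCE A (Python) =====
-- from typing import List
--
-- def get_counts_dicts(pos_lis: List[str], num_lis: List[int]) -> dict:
--     d1 = {}
--     d2 = {}
--
--     for position, num in zip(pos_lis, num_lis):
--         if position in d1:
--             d1[position] += 1
--             d2[position] += num
--         else:
--             d1[position] = 1
--             d2[position] = num
--     return d1, d2
-- ===== SOURCE B (Python) =====
-- from typing import List
--
-- def get_counts_dicts(pos_lis: List[str], num_lis: List[int]) -> dict:
--     # Different algorithm: first collect the distinct keys in first-occurrence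
--     # order, then compute each key's count and sum by a full scan over the
--     # paired data (no incremental dict updates at all).
--     pairs = list(zip(pos_lis, num_lis))
--     keys = []
--     for p, _ in pairs:
--         if p not in keys:
--             keys.append(p)
--     d1 = {k: sum(1 for p, _ in pairs if p == k) for k in keys}
--     d2 = {k: sum(n for p, n in pairs if p == k) for k in keys}
--     return d1, d2
-- ===== Notes on version B (the rewrite author's own statement) =====
-- stated objective: alternative
-- what changed: Replaces A's single fused loop of incremental dict updates by a dedup-then-aggregate algorithm: extract the distinct keys in first-occurrence order, then compute each key's count and sum with an independent scan over the zipped pairs (dict comprehensions, no in-place updates).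
import Mathlib
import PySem

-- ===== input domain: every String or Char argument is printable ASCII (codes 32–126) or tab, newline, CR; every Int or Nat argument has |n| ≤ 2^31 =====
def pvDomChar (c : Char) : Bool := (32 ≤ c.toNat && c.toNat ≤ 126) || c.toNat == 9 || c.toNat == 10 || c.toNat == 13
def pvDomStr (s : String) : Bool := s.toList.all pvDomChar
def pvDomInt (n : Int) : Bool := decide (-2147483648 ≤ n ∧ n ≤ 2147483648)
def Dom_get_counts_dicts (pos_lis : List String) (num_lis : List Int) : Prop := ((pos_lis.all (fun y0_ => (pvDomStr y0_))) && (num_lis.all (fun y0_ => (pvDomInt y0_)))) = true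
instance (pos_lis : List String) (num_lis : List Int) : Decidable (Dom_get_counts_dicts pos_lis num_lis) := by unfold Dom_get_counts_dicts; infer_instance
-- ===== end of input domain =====

-- B replaces A's fused incremental-dict loop by a dedup-then-aggregate algorithm
-- (distinct keys first, then an independent count/sum scan per key); same results, O(k*n) not O(n).

-- ===== PORT A =====
-- one fused loop: 'if position in d1: d1[position] += 1; d2[position] += num else: d1[position] = 1; d2[position] = num'
def get_counts_dicts (pos_lis : List String) (num_lis : List Int) : (List (String × Int)) × (List (String × Int)) :=
  let st := (pos_lis.zip num_lis).foldl
    (fun (st : PySem.Dict String Int × PySem.Dict String Int) pn =>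
      if st.1.contains pn.1 then
        (st.1.insert pn.1 (st.1.getD pn.1 0 + 1), st.2.insert pn.1 (st.2.getD pn.1 0 + pn.2))
      else
        (st.1.insert pn.1 1, st.2.insert pn.1 pn.2))
    (PySem.Dict.empty, PySem.Dict.empty)
  (st.1.items, st.2.items)

-- ===== PORT B =====
-- pairs = zip; keys = first occurrences ('if p not in keys: keys.append(p)' = Set.add);
-- then two dict comprehensions over keys, each value a sum over a scan of pairs.
def get_counts_dicts_alt (pos_lis : List String) (num_lis : List Int) : (List (String × Int)) × (List (String × Int)) :=
  let pairs := pos_lis.zip num_lis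
  let keys : PySem.Set String := pairs.foldl (fun ks pn => PySem.Set.add ks pn.1) PySem.Set.empty
  let d1 := keys.map (fun k => (k, ((pairs.filter (fun pn => pn.1 == k)).map (fun _ => (1 : Int))).sum))
  let d2 := keys.map (fun k => (k, ((pairs.filter (fun pn => pn.1 == k)).map (fun pn => pn.2)).sum))
  (d1, d2)

-- ===== PRECONDITION & SPEC =====
def Spec_get_counts_dicts (pos_lis : List String) (num_lis : List Int) (out : (List (String × Int)) × (List (String × Int))) : Prop := out = get_counts_dicts_alt pos_lis num_lis
instance (pos_lis : List String) (num_lis : List Int) (out : (List (String × Int)) × (List (String × Int))) : Decidable (Spec_get_counts_dicts pos_lis num_lis out) := by unfold Spec_get_counts_dicts; infer_instance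

-- ===== CLAIM =====
def Claim_equal_get_counts_dicts : Prop := ∀ (pos_lis : List String) (num_lis : List Int), Dom_get_counts_dicts pos_lis num_lis → Spec_get_counts_dicts pos_lis num_lis (get_counts_dicts pos_lis num_lis)

-- ===== LEMMAS AND PROOFS =====

-- A's fused loop is the pair of the two separate modify-loops,
-- given that the two dicts always contain the same keys.
theorem loopA_eq (l : List (String × Int)) (d1 d2 : PySem.Dict String Int)
    (h : ∀ k, d1.contains k = d2.contains k) :
    l.foldl
      (fun (st : PySem.Dict String Int × PySem.Dict String Int) pn =>
        if st.1.contains pn.1 then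
          (st.1.insert pn.1 (st.1.getD pn.1 0 + 1), st.2.insert pn.1 (st.2.getD pn.1 0 + pn.2))
        else
          (st.1.insert pn.1 1, st.2.insert pn.1 pn.2)) (d1, d2)
    = (l.foldl (fun d pn => d.modify pn.1 0 (· + 1)) d1,
       l.foldl (fun d pn => d.modify pn.1 0 (· + pn.2)) d2) := by
  induction l generalizing d1 d2 with
  | nil => rfl
  | cons p rest ih =>
    simp only [List.foldl_cons]
    have hstep :
        (if d1.contains p.1 then
          (d1.insert p.1 (d1.getD p.1 0 + 1), d2.insert p.1 (d2.getD p.1 0 + p.2))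
        else (d1.insert p.1 1, d2.insert p.1 p.2))
        = (d1.modify p.1 0 (· + 1), d2.modify p.1 0 (· + p.2)) := by
      by_cases hc : d1.contains p.1 = true
      · simp [hc, PySem.Dict.modify]
      · have hc2 : d2.contains p.1 = false := by rw [← h]; simpa using hc
        have g1 : d1.getD p.1 0 = 0 :=
          PySem.Dict.getD_of_not_contains d1 0 (by simpa using hc)
        have g2 : d2.getD p.1 0 = 0 := PySem.Dict.getD_of_not_contains d2 0 hc2
        simp [hc, PySem.Dict.modify, g1, g2]
    rw [hstep]
    exact ih _ _ (fun k => by simp [PySem.Dict.contains_modify, h k])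

-- value of a modify-accumulation loop at a key: the sum of g over the matching pairs
theorem getD_modify_loop (g : String × Int → Int) (l : List (String × Int))
    (d : PySem.Dict String Int) (k : String) :
    (l.foldl (fun d pn => d.modify pn.1 0 (fun v => v + g pn)) d).getD k 0
      = d.getD k 0 + ((l.filter (fun pn => pn.1 == k)).map g).sum := by
  induction l generalizing d with
  | nil => simp
  | cons p rest ih =>
    simp only [List.foldl_cons, List.filter_cons, ih]
    by_cases hk : p.1 = k
    · simp [hk, PySem.Dict.getD_modify_self]
      ring
    · have hb : (p.1 == k) = false := by simpa using hk
      simp [hb, PySem.Dict.getD_modify_of_ne d 0 (fun v => v + g p) (Ne.symm hk)]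

-- keys of a modify-accumulation loop from empty: first occurrences of the fst components
theorem keys_modify_loop (g : String × Int → Int) (l : List (String × Int)) :
    (l.foldl (fun d pn => d.modify pn.1 0 (fun v => v + g pn)) PySem.Dict.empty).keys
      = l.foldl (fun ks pn => PySem.Set.add ks pn.1) PySem.Set.empty := by
  rw [show (l.foldl (fun ks pn => PySem.Set.add ks pn.1) PySem.Set.empty)
        = PySem.Set.update PySem.Dict.empty.keys (l.map Prod.fst) from by
      simp [PySem.Set.update_map_eq_foldl_add, PySem.Dict.keys_empty, PySem.Set.empty]]
  exact PySem.Dict.keys_foldl_modify_key l Prod.fst 0 (fun _ pn v => v + g pn) PySem.Dict.empty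

-- items of a modify-accumulation loop from empty: B's comprehension
theorem items_modify_loop (g : String × Int → Int) (l : List (String × Int)) :
    (l.foldl (fun d pn => d.modify pn.1 0 (fun v => v + g pn)) PySem.Dict.empty).items
      = (l.foldl (fun ks pn => PySem.Set.add ks pn.1) PySem.Set.empty).map
          (fun k => (k, ((l.filter (fun pn => pn.1 == k)).map g).sum)) := by
  have hnd : (l.foldl (fun d pn => d.modify pn.1 0 (fun v => v + g pn)) PySem.Dict.empty).keys.Nodup :=
    PySem.Dict.nodup_keys_foldl_modify_key l Prod.fst 0 (fun _ pn v => v + g pn) PySem.Dict.empty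
      (by simp [PySem.Dict.keys_empty])
  rw [PySem.Dict.items_eq_map_keys _ hnd 0, keys_modify_loop]
  exact List.map_congr_left (fun k _ => by
    rw [getD_modify_loop]
    simp)

theorem get_counts_dicts_eq (pos_lis : List String) (num_lis : List Int) :
    get_counts_dicts pos_lis num_lis = get_counts_dicts_alt pos_lis num_lis := by
  unfold get_counts_dicts get_counts_dicts_alt
  rw [loopA_eq _ _ _ (fun k => rfl)]
  refine Prod.ext ?_ ?_
  · exact items_modify_loop (fun _ => 1) (pos_lis.zip num_lis)
  · exact items_modify_loop (fun pn => pn.2) (pos_lis.zip num_lis)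

-- ===== VERDICT =====
theorem get_counts_dicts_spec : Claim_equal_get_counts_dicts := by
  intro pos_lis num_lis _
  exact get_counts_dicts_eq pos_lis num_lis
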